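-- pv_equiv track=rewrite | github.com/DataSciencePolimi/CSSforPolitics | TweetPredictorForMuseums.py | contains_alphabetic_characters
-- ===== SOURCE A (Python) =====
-- def contains_alphabetic_characters(word):
--     res = False
--     word = word.lower()
--     ascii_lowercase = "abcdefghijklmnopqrstuvwxyz"
--     list_alphabet = list(ascii_lowercase)
--     list_characters_of_word = list(word)
--     for character in list_characters_of_word:
--         if character in list_alphabet:
--             res = True
--             break
--     return res
-- ===== SOURCE B (Python) =====
-- def contains_alphabetic_characters(word):
--     # Delete every ASCII letter (both cases) via a translation table; letters were
--     # present iff the translated string got shorter.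
--     letters = "abcdefghijklmnopqrstuvwxyzABCDEFGHIJKLMNOPQRSTUVWXYZ"
--     return len(word.translate(str.maketrans("", "", letters))) != len(word)
-- ===== Notes on version B (the rewrite author's own statement) =====
-- stated objective: alternative
-- what changed: Instead of lowercasing and scanning with an early break for a character in the a-z list, B deletes all ASCII letters (both cases) with str.translate and a maketrans deletion table and reports whether the string's length changed; no lower() pass, no early exit, no per-character membership loop.
import Mathlib
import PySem

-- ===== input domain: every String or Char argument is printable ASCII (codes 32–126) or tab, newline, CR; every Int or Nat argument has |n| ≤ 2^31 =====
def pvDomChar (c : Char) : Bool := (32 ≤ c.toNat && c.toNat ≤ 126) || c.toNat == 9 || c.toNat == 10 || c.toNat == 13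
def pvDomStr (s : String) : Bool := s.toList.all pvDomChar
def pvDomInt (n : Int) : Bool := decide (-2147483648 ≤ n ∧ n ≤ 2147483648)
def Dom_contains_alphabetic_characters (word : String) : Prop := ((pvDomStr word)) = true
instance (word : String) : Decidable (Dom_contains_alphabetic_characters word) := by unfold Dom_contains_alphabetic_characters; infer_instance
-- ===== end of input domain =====

-- B replaces A's lowercase-then-scan-with-early-break by a length comparison: delete
-- every ASCII letter (str.translate with a maketrans deletion table) and report whether
-- the string got shorter; alternative algorithm, same behaviour.

set_option maxRecDepth 10000


-- ===== PORT A =====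
-- the for-loop with early break: res starts False, set to True and break on first hit
def pvLoopA (list_alphabet : List Char) : List Char → Bool → Bool
  | [], res => res
  | c :: rest, res => if list_alphabet.contains c then true else pvLoopA list_alphabet rest res

def contains_alphabetic_characters (word : String) : Bool :=
  pvLoopA ("abcdefghijklmnopqrstuvwxyz".toList) (PySem.Str.lower word).toList false

-- ===== PORT B =====
-- str.maketrans("", "", letters) builds a deletion table; translate keeps exactly the
-- characters not in it (ported by hand as a filter, exact for a pure deletion table);
-- the result is len(translated) != len(word)
def pvDeleteSet : List Char := "abcdefghijklmnopqrstuvwxyzABCDEFGHIJKLMNOPQRSTUVWXYZ".toList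

def contains_alphabetic_characters_alt (word : String) : Bool :=
  decide ((word.toList.filter (fun c => !(pvDeleteSet.contains c))).length ≠ word.toList.length)

-- ===== PRECONDITION & SPEC =====
def Spec_contains_alphabetic_characters (word : String) (out : Bool) : Prop := out = contains_alphabetic_characters_alt word
instance (word : String) (out : Bool) : Decidable (Spec_contains_alphabetic_characters word out) := by unfold Spec_contains_alphabetic_characters; infer_instance

-- ===== CLAIM (what is proved, stated in full; the proofs are below) =====
def Claim_equal_contains_alphabetic_characters : Prop := ∀ (word : String), Dom_contains_alphabetic_characters word → Spec_contains_alphabetic_characters word (contains_alphabetic_characters word)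

-- ===== LEMMAS AND PROOFS =====
theorem pvLoopA_eq_any (al : List Char) (xs : List Char) :
    pvLoopA al xs false = xs.any (fun c => al.contains c) := by
  induction xs with
  | nil => rfl
  | cons c rest ih => simp [pvLoopA, ih]

theorem pv_ofNat_toNat (c : Char) : Char.ofNat c.toNat = c := Char.ofNat_toNat c

theorem pv_upper_aux : ∀ n : Nat, n < 91 → 65 ≤ n →
    (Char.ofNat (n + 32) ∈ "abcdefghijklmnopqrstuvwxyz".toList ∧
      Char.ofNat n ∈ "ABCDEFGHIJKLMNOPQRSTUVWXYZ".toList) := by decide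

theorem pv_charIff (c : Char) :
    PySem.Chars.lowerChar c ∈ "abcdefghijklmnopqrstuvwxyz".toList ↔ c ∈ pvDeleteSet := by
  have hsplit : pvDeleteSet =
      "abcdefghijklmnopqrstuvwxyz".toList ++ "ABCDEFGHIJKLMNOPQRSTUVWXYZ".toList := by decide
  rw [hsplit, List.mem_append]
  by_cases h : PySem.Chars.isupper c = true
  · have hb : 65 ≤ c.toNat ∧ c.toNat ≤ 90 := by
      simp only [PySem.Chars.isupper, Bool.and_eq_true, decide_eq_true_eq, Char.le_def,
        UInt32.le_iff_toNat_le] at h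
      exact h
    have haux := pv_upper_aux c.toNat (by omega) (by omega)
    rw [show PySem.Chars.lowerChar c = Char.ofNat (c.toNat + 32) by
      simp [PySem.Chars.lowerChar, h]]
    have hupmem : c ∈ "ABCDEFGHIJKLMNOPQRSTUVWXYZ".toList := by
      rw [← pv_ofNat_toNat c]; exact haux.2
    exact ⟨fun _ => Or.inr hupmem, fun _ => haux.1⟩
  · have hlc : PySem.Chars.lowerChar c = c := by simp [PySem.Chars.lowerChar, h]
    have hall : ∀ x ∈ "ABCDEFGHIJKLMNOPQRSTUVWXYZ".toList, PySem.Chars.isupper x = true :=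
      List.all_eq_true.mp (by decide)
    have hup : c ∉ "ABCDEFGHIJKLMNOPQRSTUVWXYZ".toList := fun hm => h (hall c hm)
    rw [hlc]
    exact ⟨Or.inl, fun h' => h'.resolve_right hup⟩

theorem pv_charBool (c : Char) :
    ("abcdefghijklmnopqrstuvwxyz".toList).contains (PySem.Chars.lowerChar c)
      = pvDeleteSet.contains c := by
  rw [Bool.eq_iff_iff]
  simpa using pv_charIff c

theorem pvA_eq_any (word : String) :
    contains_alphabetic_characters word = word.toList.any (fun c => pvDeleteSet.contains c) := by
  unfold contains_alphabetic_characters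
  rw [pvLoopA_eq_any, PySem.Str.toList_lower, PySem.Chars.lower, List.any_map]
  have hfun : ((fun c => ("abcdefghijklmnopqrstuvwxyz".toList).contains c) ∘ PySem.Chars.lowerChar)
      = (fun c => pvDeleteSet.contains c) := funext fun c => pv_charBool c
  rw [hfun]

-- ===== VERDICT (by name: the statement is the Claim_ definition above) =====
theorem contains_alphabetic_characters_spec : Claim_equal_contains_alphabetic_characters := by
  intro word _
  unfold Spec_contains_alphabetic_characters contains_alphabetic_characters_alt
  rw [pvA_eq_any, Bool.eq_iff_iff, List.any_eq_true, decide_eq_true_iff]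
  constructor
  · rintro ⟨c, hc, h⟩
    intro hlen
    rw [List.length_filter_eq_length_iff] at hlen
    have h2 := hlen c hc
    rw [Bool.not_eq_eq_eq_not, Bool.not_true] at h2
    rw [h2] at h
    exact Bool.false_ne_true h
  · intro hlen
    by_contra hno
    push Not at hno
    apply hlen
    rw [List.length_filter_eq_length_iff]
    intro c hc
    have h3 := hno c hc
    simp only [Bool.not_eq_eq_eq_not, Bool.not_true]
    exact (Bool.not_eq_true _).mp h3
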